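-- pv_equiv track=rewrite | github.com/vshalisko/python_at_JetBrainsAcademy | Project_Dominoes/Stage_3.py | find_starting_piece_and_player
-- ===== SOURCE A (Python) =====
-- def find_starting_piece_and_player(computer_pieces, player_pieces):
--     # Finds the starting piece and determines the first player
--     computer_doubles = [d for d in computer_pieces if d[0] == d[1]]
--     player_doubles = [d for d in player_pieces if d[0] == d[1]]
--
--     if not computer_doubles and not player_doubles:
--         return None, None, None, None
--
--     if computer_doubles and (not player_doubles or max(computer_doubles) > max(player_doubles)):
--         starting_piece = list(max(computer_doubles))
--         computer_pieces.remove(starting_piece)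
--         status = "player"
--     else:
--         starting_piece = list(max(player_doubles))
--         player_pieces.remove(starting_piece)
--         status = "computer"
--
--     return starting_piece, computer_pieces, player_pieces, status
-- ===== SOURCE B (Python) =====
-- def find_starting_piece_and_player(computer_pieces, player_pieces):
--     # Sort-then-pick: merge every double from both hands into one list tagged
--     # by owner rank (computer=0, player=1, so a tied double sorts after the
--     # computer's copy), sort it once, and take the last (largest) entry.
--     # Mutates the chosen owner's list in place (remove), like the original.
--     tagged = [(d, 0) for d in computer_pieces if d[0] == d[1]]
--     tagged += [(d, 1) for d in player_pieces if d[0] == d[1]]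
--     if not tagged:
--         return None, None, None, None
--     tagged.sort()
--     best, owner = tagged[-1]
--     starting_piece = list(best)
--     if owner == 0:
--         computer_pieces.remove(starting_piece)
--         return starting_piece, computer_pieces, player_pieces, "player"
--     player_pieces.remove(starting_piece)
--     return starting_piece, computer_pieces, player_pieces, "computer"
-- ===== Notes on version B (the rewrite author's own statement) =====
-- stated objective: alternative
-- what changed: Replaces A's per-hand filtered doubles lists, two max() calls and a comparison branch by one merged list of (double, owner-rank) pairs that is sorted once; its last entry decides both the starting piece and the owner (player rank 1 makes a tied double sort after the computer's copy, reproducing A's tie-break).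
import Mathlib
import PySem

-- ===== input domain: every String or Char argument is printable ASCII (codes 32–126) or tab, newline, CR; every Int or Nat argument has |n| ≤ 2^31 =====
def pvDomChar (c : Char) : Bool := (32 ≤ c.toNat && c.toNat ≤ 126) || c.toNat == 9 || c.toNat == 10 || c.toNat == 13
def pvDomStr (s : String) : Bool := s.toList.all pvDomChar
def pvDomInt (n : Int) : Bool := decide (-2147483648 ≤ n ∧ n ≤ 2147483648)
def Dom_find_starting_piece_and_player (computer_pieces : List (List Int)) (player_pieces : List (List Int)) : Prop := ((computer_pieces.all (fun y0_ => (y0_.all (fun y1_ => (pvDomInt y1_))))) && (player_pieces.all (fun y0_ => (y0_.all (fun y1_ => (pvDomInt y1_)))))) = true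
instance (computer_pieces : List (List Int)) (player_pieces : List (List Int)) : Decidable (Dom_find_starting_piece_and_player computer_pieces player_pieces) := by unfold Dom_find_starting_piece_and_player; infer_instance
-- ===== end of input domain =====

-- B replaces A's two per-hand doubles lists + two max() calls + comparison branch by one merged
-- owner-tagged list that is sorted once, picking its last entry (alternative, sort-then-pick).
-- NOTE: both Pythons mutate the chosen owner's list via .remove; the proof is about the returned tuple.

-- shared low-level helpers (both Pythons use the same built-ins):
-- Python's `d[0] == d[1]`; exact for d.length ≥ 2 (Pre_); Python raises IndexError on shorter d
def pyIsDouble (d : List Int) : Bool :=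
  match d with
  | a :: b :: _ => a == b
  | _ => false

-- Python's list.remove(v): drop the first element equal to v (absence is unreachable here:
-- the removed value is always a member, so the fall-through identity branch is never taken)
def pyRemove : List (List Int) → List Int → List (List Int)
  | [], _ => []
  | x :: xs, v => if x == v then xs else x :: pyRemove xs v

-- ===== PORT A =====
-- Python's max(xs) on a nonempty list: running maximum, `if x > m: m = x` (the [] branch is
-- unreachable: A guards every max() call by nonemptiness); Lean's `<` on List Int is Python's
-- lexicographic list comparison
def pyMaxD (xs : List (List Int)) : List Int :=
  match xs with
  | [] => []
  | h :: t => t.foldl (fun m x => if m < x then x else m) h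

def find_starting_piece_and_player (computer_pieces : List (List Int)) (player_pieces : List (List Int)) : Option (List Int) × Option (List (List Int)) × Option (List (List Int)) × Option String :=
  let computer_doubles := computer_pieces.filter pyIsDouble
  let player_doubles := player_pieces.filter pyIsDouble
  if computer_doubles.isEmpty && player_doubles.isEmpty then
    (none, none, none, none)
  else if !computer_doubles.isEmpty && (player_doubles.isEmpty || pyMaxD player_doubles < pyMaxD computer_doubles) then
    let starting_piece := pyMaxD computer_doubles
    (some starting_piece, some (pyRemove computer_pieces starting_piece), some player_pieces, some "player")
  else
    let starting_piece := pyMaxD player_doubles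
    (some starting_piece, some computer_pieces, some (pyRemove player_pieces starting_piece), some "computer")

-- ===== PORT B =====
-- one merged list of (double, owner-rank) pairs; tagged.sort() compares Python tuples
-- (list first, then the int rank) = PySem.List.sorted2 with the two projections as keys;
-- tagged[-1] = pyGet? (-1)
def find_starting_piece_and_player_alt (computer_pieces : List (List Int)) (player_pieces : List (List Int)) : Option (List Int) × Option (List (List Int)) × Option (List (List Int)) × Option String :=
  let tagged := (computer_pieces.filter pyIsDouble).map (fun d => (d, (0 : Int)))
                ++ (player_pieces.filter pyIsDouble).map (fun d => (d, (1 : Int)))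
  if tagged.isEmpty then (none, none, none, none)
  else
    match PySem.List.pyGet? (PySem.List.sorted2 tagged (fun t => t.1) (fun t => t.2)) (-1) with
    | none => (none, none, none, none)  -- unreachable: sorted2 of a nonempty list is nonempty
    | some (best, owner) =>
      if owner == 0 then
        (some best, some (pyRemove computer_pieces best), some player_pieces, some "player")
      else
        (some best, some computer_pieces, some (pyRemove player_pieces best), some "computer")

-- ===== PRECONDITION & SPEC =====
-- Pre_ excludes exactly the inputs where the Python A raises IndexError: a piece with fewer
-- than two entries makes `d[0] == d[1]` raise (in B as well); A returns on every other input.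
def Pre_find_starting_piece_and_player (computer_pieces : List (List Int)) (player_pieces : List (List Int)) : Prop :=
  (∀ d ∈ computer_pieces, 2 ≤ d.length) ∧ (∀ d ∈ player_pieces, 2 ≤ d.length)
instance (computer_pieces : List (List Int)) (player_pieces : List (List Int)) : Decidable (Pre_find_starting_piece_and_player computer_pieces player_pieces) := by unfold Pre_find_starting_piece_and_player; infer_instance

def pvWitness_find_starting_piece_and_player : List (List Int) × List (List Int) :=
  ([[2, 2], [0, 1]], [[3, 3], [1, 2]])

def Spec_find_starting_piece_and_player (computer_pieces : List (List Int)) (player_pieces : List (List Int)) (out : Option (List Int) × Option (List (List Int)) × Option (List (List Int)) × Option String) : Prop := out = find_starting_piece_and_player_alt computer_pieces player_pieces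
instance (computer_pieces : List (List Int)) (player_pieces : List (List Int)) (out : Option (List Int) × Option (List (List Int)) × Option (List (List Int)) × Option String) : Decidable (Spec_find_starting_piece_and_player computer_pieces player_pieces out) := by unfold Spec_find_starting_piece_and_player; infer_instance

-- ===== CLAIM (what is proved, stated in full; the proofs are below) =====
def Claim_equal_find_starting_piece_and_player : Prop := ∀ (computer_pieces : List (List Int)) (player_pieces : List (List Int)), Dom_find_starting_piece_and_player computer_pieces player_pieces → Pre_find_starting_piece_and_player computer_pieces player_pieces → Spec_find_starting_piece_and_player computer_pieces player_pieces (find_starting_piece_and_player computer_pieces player_pieces)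

-- ===== LEMMAS AND PROOFS =====

-- the comparison sorted2 uses on our tagged pairs
def ltP (a b : List Int × Int) : Bool :=
  decide (a.1 < b.1) || (!decide (b.1 < a.1) && decide (a.2 < b.2))

theorem ltP_iff (a b : List Int × Int) : ltP a b = true ↔ toLex a < toLex b := by
  unfold ltP
  rw [Prod.Lex.lt_iff]
  simp only [ofLex_toLex, Bool.or_eq_true, Bool.and_eq_true, Bool.not_eq_true',
    decide_eq_true_eq, decide_eq_false_iff_not]
  constructor
  · rintro (h | ⟨h1, h2⟩)
    · exact Or.inl h
    · by_cases h3 : a.1 < b.1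
      · exact Or.inl h3
      · exact Or.inr ⟨le_antisymm (le_of_not_gt h1) (le_of_not_gt h3), h2⟩
  · rintro (h | ⟨h1, h2⟩)
    · exact Or.inl h
    · exact Or.inr ⟨by rw [h1]; exact lt_irrefl _, h2⟩

theorem ltP_eq_false_iff (a b : List Int × Int) : ltP a b = false ↔ ¬ toLex a < toLex b := by
  rw [← ltP_iff]
  cases h : ltP a b <;> simp

theorem eq_of_ltP_false (a b : List Int × Int) (h1 : ltP a b = false) (h2 : ltP b a = false) :
    a = b := by
  have ha := (ltP_eq_false_iff a b).1 h1
  have hb := (ltP_eq_false_iff b a).1 h2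
  exact toLex.injective (le_antisymm (le_of_not_gt hb) (le_of_not_gt ha))

def pmax (m x : List Int × Int) : List Int × Int := if ltP m x then x else m

theorem pmax_eq_lexmax (m x : List Int × Int) :
    toLex (pmax m x) = max (toLex m) (toLex x) := by
  unfold pmax
  cases h : ltP m x
  · rw [if_neg (by simp), max_eq_left (le_of_not_gt ((ltP_eq_false_iff m x).1 h))]
  · rw [if_pos rfl, max_eq_right (le_of_lt ((ltP_iff m x).1 h))]

theorem insertBy_ne_nil (before : (List Int × Int) → (List Int × Int) → Bool)
    (x : List Int × Int) (ys : List (List Int × Int)) :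
    PySem.List.insertBy before x ys ≠ [] := by
  cases ys with
  | nil => simp [PySem.List.insertBy]
  | cons y t =>
    unfold PySem.List.insertBy
    split <;> simp

theorem getLast?_insertBy (x : List Int × Int) (ys : List (List Int × Int)) :
    (PySem.List.insertBy ltP x ys).getLast? =
      if ys.any (fun y => ltP x y) then ys.getLast? else some x := by
  induction ys with
  | nil => simp [PySem.List.insertBy]
  | cons y t ih =>
    unfold PySem.List.insertBy
    by_cases h : ltP x y = true
    · simp [h]
    · rw [if_neg h]
      rcases ht : PySem.List.insertBy ltP x t with _ | ⟨z, zs⟩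
      · exact absurd ht (insertBy_ne_nil _ _ _)
      · rw [List.getLast?_cons_cons, ← ht, ih]
        simp only [List.any_cons, h, Bool.false_or]
        by_cases ha : t.any (fun y => ltP x y) = true
        · have htne : t ≠ [] := by
            rcases t with _ | _
            · simp at ha
            · simp
          rcases t with _ | ⟨w, ws⟩
          · simp at ha
          · rw [if_pos ha, if_pos ha, List.getLast?_cons_cons]
        · simp [ha]

-- the core loop invariant: the last element of the insertion-sort accumulator is its maximum,
-- and it evolves as the running lexicographic maximum
theorem foldl_insertBy_getLast (l : List (List Int × Int)) (acc : List (List Int × Int))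
    (m : List Int × Int) (hm : acc.getLast? = some m) (hmax : ∀ y ∈ acc, ltP m y = false) :
    (l.foldl (fun a x => PySem.List.insertBy ltP x a) acc).getLast? = some (l.foldl pmax m) := by
  induction l generalizing acc m with
  | nil => simpa using hm
  | cons x t ih =>
    simp only [List.foldl_cons]
    by_cases ha : acc.any (fun y => ltP x y) = true
    · -- x is inserted strictly inside; the last element stays m, and x < m
      obtain ⟨y, hy, hxy⟩ := List.any_eq_true.1 ha
      have hxm : toLex x < toLex m :=
        lt_of_lt_of_le ((ltP_iff x y).1 hxy)
          (le_of_not_gt ((ltP_eq_false_iff m y).1 (hmax y hy)))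
      have hmx : ltP m x = false := (ltP_eq_false_iff m x).2 (asymm hxm)
      have hpmx : pmax m x = m := by simp [pmax, hmx]
      rw [hpmx]
      refine ih _ m ?_ ?_
      · rw [getLast?_insertBy, if_pos ha, hm]
      · intro z hz
        rcases (PySem.List.mem_insertBy ltP x z acc).1 hz with rfl | hz
        · exact hmx
        · exact hmax z hz
    · -- x goes to the end and becomes the new maximum
      have ha' : acc.any (fun y => ltP x y) = false := by
        cases h : acc.any (fun y => ltP x y)
        · rfl
        · exact absurd h ha
      have hall : ∀ y ∈ acc, ltP x y = false := by
        intro y hy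
        cases h : ltP x y
        · rfl
        · exact absurd (List.any_eq_true.2 ⟨y, hy, h⟩) ha
      have hxm : ltP x m = false := hall m (List.mem_of_getLast? hm)
      have hpmx : pmax m x = x := by
        by_cases h : ltP m x = true
        · simp [pmax, h]
        · have h' : ltP m x = false := by
            cases hh : ltP m x
            · rfl
            · exact absurd hh h
          have : m = x := eq_of_ltP_false m x h' hxm
          simp [pmax, this]
      rw [hpmx]
      refine ih _ x ?_ ?_
      · rw [getLast?_insertBy, ha']
        simp
      · intro z hz
        rcases (PySem.List.mem_insertBy ltP x z acc).1 hz with rfl | hz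
        · exact (ltP_eq_false_iff z z).2 (lt_irrefl _)
        · exact hall z hz

theorem sorted2_eq_foldl (tagged : List (List Int × Int)) :
    PySem.List.sorted2 tagged (fun t => t.1) (fun t => t.2) =
      tagged.foldl (fun a x => PySem.List.insertBy ltP x a) [] := rfl

theorem sorted2_getLast (t0 : List Int × Int) (ts : List (List Int × Int)) :
    (PySem.List.sorted2 (t0 :: ts) (fun t => t.1) (fun t => t.2)).getLast? =
      some (ts.foldl pmax t0) := by
  rw [sorted2_eq_foldl, List.foldl_cons]
  have h0 : PySem.List.insertBy ltP t0 ([] : List (List Int × Int)) = [t0] := by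
    simp [PySem.List.insertBy]
  rw [h0]
  refine foldl_insertBy_getLast ts [t0] t0 (by simp) ?_
  intro y hy
  simp only [List.mem_singleton] at hy
  subst hy
  exact (ltP_eq_false_iff y y).2 (lt_irrefl _)

-- running pmax over a constant-tag block is A's running list-max, with that tag
theorem foldl_pmax_tag (t : Int) (l : List (List Int)) (m : List Int) :
    (l.map (fun d => (d, t))).foldl pmax (m, t) =
      (l.foldl (fun mm x => if mm < x then x else mm) m, t) := by
  induction l generalizing m with
  | nil => rfl
  | cons x xs ih =>
    simp only [List.map_cons, List.foldl_cons]
    have hstep : pmax (m, t) (x, t) = ((if m < x then x else m), t) := by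
      unfold pmax ltP
      by_cases h : m < x
      · simp [h, not_lt_of_gt h]
      · simp [h]
    rw [hstep, ih]

-- transport the running pmax to the Lex linear order
theorem foldl_pmax_lex (l : List (List Int × Int)) (m : List Int × Int) :
    toLex (l.foldl pmax m) = (l.map toLex).foldl max (toLex m) := by
  induction l generalizing m with
  | nil => rfl
  | cons x xs ih =>
    simp only [List.map_cons, List.foldl_cons]
    rw [ih, pmax_eq_lexmax]

theorem foldl_max_init {α : Type} [LinearOrder α] (l : List α) (a b : α) :
    l.foldl max (max a b) = max a (l.foldl max b) := by
  induction l generalizing b with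
  | nil => rfl
  | cons x t ih => simpa [List.foldl_cons, max_assoc] using ih (max b x)

-- the combined fold over both tagged blocks is the lexicographic max of the two per-hand maxima
theorem foldl_pmax_both (hc hp : List Int) (tc tp : List (List Int)) :
    ((tc.map (fun d => (d, (0 : Int)))
        ++ (hp, (1 : Int)) :: tp.map (fun d => (d, (1 : Int)))).foldl pmax (hc, 0)) =
      (if pyMaxD (hp :: tp) < pyMaxD (hc :: tc)
        then (pyMaxD (hc :: tc), (0 : Int)) else (pyMaxD (hp :: tp), (1 : Int))) := by
  have hMc : (tc.map (fun d => (d, (0 : Int)))).foldl pmax (hc, 0) = (pyMaxD (hc :: tc), 0) :=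
    foldl_pmax_tag 0 tc hc
  have hMp : (tp.map (fun d => (d, (1 : Int)))).foldl pmax (hp, 1) = (pyMaxD (hp :: tp), 1) :=
    foldl_pmax_tag 1 tp hp
  have key : toLex (((tc.map (fun d => (d, (0 : Int)))
        ++ (hp, (1 : Int)) :: tp.map (fun d => (d, (1 : Int)))).foldl pmax (hc, 0))) =
      max (toLex ((pyMaxD (hc :: tc), (0 : Int)) : List Int × Int))
          (toLex ((pyMaxD (hp :: tp), (1 : Int)) : List Int × Int)) := by
    rw [List.foldl_append, hMc, foldl_pmax_lex]
    simp only [List.map_cons, List.foldl_cons]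
    rw [foldl_max_init, ← foldl_pmax_lex, hMp]
  by_cases h : pyMaxD (hp :: tp) < pyMaxD (hc :: tc)
  · have hlt : toLex ((pyMaxD (hp :: tp), (1 : Int)) : List Int × Int) <
        toLex ((pyMaxD (hc :: tc), (0 : Int)) : List Int × Int) := by
      rw [Prod.Lex.lt_iff]
      simp only [ofLex_toLex]
      exact Or.inl h
    rw [if_pos h]
    apply toLex.injective
    rw [key, max_eq_left (le_of_lt hlt)]
  · have hle : pyMaxD (hc :: tc) ≤ pyMaxD (hp :: tp) := le_of_not_gt h
    have hlt : toLex ((pyMaxD (hc :: tc), (0 : Int)) : List Int × Int) <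
        toLex ((pyMaxD (hp :: tp), (1 : Int)) : List Int × Int) := by
      rw [Prod.Lex.lt_iff]
      simp only [ofLex_toLex]
      rcases lt_or_eq_of_le hle with h1 | h1
      · exact Or.inl h1
      · exact Or.inr ⟨h1, by norm_num⟩
    rw [if_neg h]
    apply toLex.injective
    rw [key, max_eq_right (le_of_lt hlt)]

-- ===== VERDICT (by name: the statement is the Claim_ definition above) =====
theorem find_starting_piece_and_player_spec : Claim_equal_find_starting_piece_and_player := by
  intro c p _ _
  unfold Spec_find_starting_piece_and_player
  unfold find_starting_piece_and_player find_starting_piece_and_player_alt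
  rcases hcd : c.filter pyIsDouble with _ | ⟨hc, tc⟩ <;>
    rcases hpd : p.filter pyIsDouble with _ | ⟨hp, tp⟩
  · simp
  · -- only player doubles
    simp only [List.map_nil, List.map_cons, List.nil_append, List.isEmpty_nil, List.isEmpty_cons,
      Bool.true_and, Bool.not_true, Bool.false_and, Bool.false_or]
    rw [PySem.List.pyGet?_neg_one, sorted2_getLast, foldl_pmax_tag]
    simp [pyMaxD]
  · -- only computer doubles
    simp only [List.map_nil, List.map_cons, List.append_nil, List.isEmpty_nil, List.isEmpty_cons,
      Bool.and_true, Bool.not_false, Bool.true_and]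
    rw [PySem.List.pyGet?_neg_one, sorted2_getLast, foldl_pmax_tag]
    simp [pyMaxD]
  · -- both hands have doubles
    simp only [List.map_cons, List.cons_append, List.isEmpty_cons,
      Bool.false_and, Bool.not_false, Bool.true_and, Bool.false_or]
    rw [PySem.List.pyGet?_neg_one, sorted2_getLast, foldl_pmax_both]
    by_cases h : pyMaxD (hp :: tp) < pyMaxD (hc :: tc)
    · simp [h]
    · simp [h]
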